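-- pv_equiv track=rewrite | github.com/Motunrayo321/Programming-review | Week 5/Pset 5/Re-requesting a vanity plate/plates.py | last_alpha
-- ===== SOURCE A (Python) =====
-- def last_alpha(s):
--
--     flag = False
--
--     if len(s) >= 2:
--         for i in range(len(s)-1):
--             if s[i].isdigit():
--                 if s[i+1].isalpha():
--                     flag = False
--                 else:
--                     flag = True
--             else:
--                 flag = True
--
--     return flag
-- ===== SOURCE B (Python) =====
-- def last_alpha(s):
--     if len(s) < 2:
--         return False
--     return not (s[-2].isdigit() and s[-1].isalpha())
-- ===== Notes on version B (the rewrite author's own statement) =====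
-- stated objective: simpler
-- what changed: Replaces the whole-string scan (whose flag is overwritten every iteration, so only the final pair matters) with an O(1) closed-form check on the last two characters.
import Mathlib
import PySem

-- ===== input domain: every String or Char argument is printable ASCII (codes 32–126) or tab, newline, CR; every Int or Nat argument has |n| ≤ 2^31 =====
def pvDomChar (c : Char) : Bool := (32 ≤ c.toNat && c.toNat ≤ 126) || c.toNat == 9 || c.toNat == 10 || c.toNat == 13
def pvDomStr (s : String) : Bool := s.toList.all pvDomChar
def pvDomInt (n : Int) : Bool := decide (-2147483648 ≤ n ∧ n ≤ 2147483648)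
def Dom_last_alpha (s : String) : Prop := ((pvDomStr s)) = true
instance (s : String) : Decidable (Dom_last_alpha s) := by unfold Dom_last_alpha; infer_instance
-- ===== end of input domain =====

-- B replaces A's whole-string scan (whose flag is overwritten each iteration) with an O(1)
-- closed-form check of the last two characters; return values agree on every input.

-- ===== PORT A =====
def last_alpha (s : String) : Bool :=
  let cs := s.toList
  let flag := false
  if cs.length ≥ 2 then
    (List.range (cs.length - 1)).foldl
      (fun _flag i =>
        if PySem.Chars.isdigit (cs.getD i ' ') then
          if PySem.Chars.isalpha (cs.getD (i+1) ' ') then false else true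
        else true)
      flag
  else flag

-- ===== PORT B =====
def last_alpha_alt (s : String) : Bool :=
  let cs := s.toList
  if cs.length < 2 then false
  else !(((PySem.List.pyGet? cs (-2)).any PySem.Chars.isdigit) &&
         ((PySem.List.pyGet? cs (-1)).any PySem.Chars.isalpha))

-- ===== PRECONDITION & SPEC =====
def Spec_last_alpha (s : String) (out : Bool) : Prop := out = last_alpha_alt s
instance (s : String) (out : Bool) : Decidable (Spec_last_alpha s out) := by unfold Spec_last_alpha; infer_instance

-- ===== CLAIM (what is proved, stated in full; the proofs are below) =====
def Claim_equal_last_alpha : Prop := ∀ (s : String), Dom_last_alpha s → Spec_last_alpha s (last_alpha s)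

-- ===== LEMMAS AND PROOFS =====

-- A's loop overwrites the accumulator unconditionally, so the fold returns the value at the last index.
theorem foldl_overwrite (f : Nat → Bool) (init : Bool) (n : Nat) :
    (List.range (n+1)).foldl (fun _ i => f i) init = f n := by
  simp [List.range_succ]

-- ===== VERDICT (by name: the statement is the Claim_ definition above) =====
theorem last_alpha_spec : Claim_equal_last_alpha := by
  intro s _
  unfold Spec_last_alpha last_alpha last_alpha_alt
  set cs := s.toList with hcs
  by_cases h : cs.length ≥ 2
  · have h1 : ¬ cs.length < 2 := by omega
    have hn : cs.length - 1 = (cs.length - 2) + 1 := by omega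
    simp only [h, if_pos, h1, if_neg, not_false_iff, hn]
    rw [foldl_overwrite]
    have h2 : PySem.List.pyGet? cs (-2) = some (cs.getD (cs.length - 2) ' ') := by
      have hlt : cs.length - 2 < cs.length := by omega
      simp only [PySem.List.pyGet?, PySem.List.pyIdx?]
      simp
      rw [if_pos (by omega : 2 ≤ cs.length)]
      simp [List.getElem?_eq_getElem hlt]
    have h3 : PySem.List.pyGet? cs (-1) = some (cs.getD (cs.length - 1) ' ') := by
      have hlt : cs.length - 1 < cs.length := by omega
      simp only [PySem.List.pyGet?, PySem.List.pyIdx?]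
      simp
      rw [if_pos (by omega : 1 ≤ cs.length)]
      simp [List.getElem?_eq_getElem hlt]
    rw [h2, h3, hn]
    simp only [Option.any_some]
    by_cases hd : PySem.Chars.isdigit (cs.getD (cs.length - 2) ' ') = true <;>
      by_cases ha : PySem.Chars.isalpha (cs.getD (cs.length - 2 + 1) ' ') = true <;>
        first | simp [hd, ha] | simp
  · have h1 : cs.length < 2 := by omega
    simp [h, h1]
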